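-- pv_equiv track=rewrite | github.com/Mlisq/GTIIT-MSE-Resourses | Python/hw4q4.py | checkQualified
-- ===== SOURCE A (Python) =====
-- def checkQualified(List = [], Index = 0, ValueX = 0, sumForNow = 0):
--
--     Length = len(List)
--
--     if(((int)(List[Index]) + sumForNow) > ValueX):
--         return False
--
--     if (((int)(List[Index]) + sumForNow) == ValueX):
--         return True
--     else:
--         if Index + 1 == Length:
--             return False
--         return checkQualified(List, Index + 1, ValueX, sumForNow + (int)(List[Index]))
-- ===== SOURCE B (Python) =====
-- def checkQualified(List = [], Index = 0, ValueX = 0, sumForNow = 0):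
--     # Stage 1: materialize all running prefix totals from position Index onward.
--     total = sumForNow + int(List[Index])
--     prefix = [total]
--     for i in range(Index + 1, len(List)):
--         total += int(List[i])
--         prefix.append(total)
--     # Stage 2: the answer is whether the FIRST total that reaches ValueX hits it exactly.
--     hits = [t for t in prefix if t >= ValueX]
--     return bool(hits) and hits[0] == ValueX
-- ===== Notes on version B (the rewrite author's own statement) =====
-- stated objective: alternative
-- what changed: Replaced A's early-exit recursion (three branch tests plus an explicit end-of-list check per step) by a staged computation: read List[Index] once, materialize the list of running prefix totals over range(Index+1, len(List)), then filter the totals that reach ValueX and test whether the first such total equals it exactly.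
import Mathlib
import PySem

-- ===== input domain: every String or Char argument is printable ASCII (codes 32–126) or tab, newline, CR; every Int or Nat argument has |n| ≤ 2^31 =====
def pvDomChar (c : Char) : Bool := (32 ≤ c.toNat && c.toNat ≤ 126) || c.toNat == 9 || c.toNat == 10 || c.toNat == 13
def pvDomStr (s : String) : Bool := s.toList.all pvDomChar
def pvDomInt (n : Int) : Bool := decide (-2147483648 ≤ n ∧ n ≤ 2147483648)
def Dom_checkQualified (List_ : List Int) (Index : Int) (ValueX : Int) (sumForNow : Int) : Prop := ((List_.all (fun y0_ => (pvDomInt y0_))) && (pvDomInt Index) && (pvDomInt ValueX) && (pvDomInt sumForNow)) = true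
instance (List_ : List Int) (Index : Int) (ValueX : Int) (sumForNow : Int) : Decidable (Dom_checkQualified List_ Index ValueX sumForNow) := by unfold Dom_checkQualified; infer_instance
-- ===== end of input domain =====

-- B replaces A's early-exit recursion by a staged computation: materialize the running
-- pref totals over range(Index, len(List)), then test whether the first total reaching
-- ValueX equals it exactly (objective: alternative decomposition, same cost).

-- ===== PORT A =====
-- fuel only makes the recursion total; inside Pre_ it is never exhausted (proved below)
def checkQualifiedFuel : Nat → List Int → Int → Int → Int → Bool
  | 0, _, _, _, _ => false
  | fuel+1, L, Index, ValueX, sumForNow =>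
    match PySem.List.pyGet? L Index with
    | none => false   -- IndexError in Python; excluded by Pre_
    | some x =>
      if x + sumForNow > ValueX then false
      else if x + sumForNow = ValueX then true
      else if Index + 1 = (L.length : Int) then false
      else checkQualifiedFuel fuel L (Index + 1) ValueX (sumForNow + x)

def checkQualified (List_ : List Int) (Index : Int) (ValueX : Int) (sumForNow : Int) : Bool :=
  checkQualifiedFuel (2 * List_.length + 1) List_ Index ValueX sumForNow

-- ===== PORT B =====
-- Stage 1 of Source B: the running totals 'prefix' accumulated over the range list.
-- A failed element access (IndexError in Python, outside Pre_) cuts the list short.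
def altPrefixTotals (L : List Int) : List Int → Int → List Int
  | [], _ => []
  | i :: rest, total =>
    match PySem.List.pyGet? L i with
    | none => []   -- IndexError in Python; excluded by Pre_
    | some x => (total + x) :: altPrefixTotals L rest (total + x)

def checkQualified_alt (List_ : List Int) (Index : Int) (ValueX : Int) (sumForNow : Int) : Bool :=
  match PySem.List.pyGet? List_ Index with
  | none => false   -- IndexError in Python (total = sumForNow + int(List[Index])); excluded by Pre_
  | some x0 =>
    let total := sumForNow + x0
    let pref := total :: altPrefixTotals List_ (PySem.List.pyRange (Index + 1) (List_.length : Int) 1) total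
    let hits := pref.filter (fun t => ValueX ≤ t)
    match hits with
    | [] => false                -- bool(hits) is False
    | h :: _ => h == ValueX      -- hits[0] == ValueX

-- ===== PRECONDITION & SPEC =====
-- A raises IndexError unless Index is a valid (possibly negative) index into List_.
def Pre_checkQualified (List_ : List Int) (Index : Int) (ValueX : Int) (sumForNow : Int) : Prop :=
  PySem.Raise.InRange List_.length Index
instance (List_ : List Int) (Index : Int) (ValueX : Int) (sumForNow : Int) : Decidable (Pre_checkQualified List_ Index ValueX sumForNow) := by unfold Pre_checkQualified; infer_instance
def pvWitness_checkQualified : List Int × Int × Int × Int := ([1, 2], 0, 3, 0)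

def Spec_checkQualified (List_ : List Int) (Index : Int) (ValueX : Int) (sumForNow : Int) (out : Bool) : Prop := out = checkQualified_alt List_ Index ValueX sumForNow
instance (List_ : List Int) (Index : Int) (ValueX : Int) (sumForNow : Int) (out : Bool) : Decidable (Spec_checkQualified List_ Index ValueX sumForNow out) := by unfold Spec_checkQualified; infer_instance

-- ===== CLAIM (what is proved, stated in full; the proofs are below) =====
def Claim_equal_checkQualified : Prop := ∀ (List_ : List Int) (Index : Int) (ValueX : Int) (sumForNow : Int), Dom_checkQualified List_ Index ValueX sumForNow → Pre_checkQualified List_ Index ValueX sumForNow → Spec_checkQualified List_ Index ValueX sumForNow (checkQualified List_ Index ValueX sumForNow)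

-- ===== LEMMAS AND PROOFS =====
-- B's stage-2 decision as a function of the materialized pref list.
def altDecide (v : Int) (pref : List Int) : Bool :=
  match pref.filter (fun t => v ≤ t) with
  | [] => false
  | h :: _ => h == v

lemma checkQualified_main : ∀ (fuel : Nat) (L : List Int) (v i s : Int),
    (L.length : Int) - i ≤ (fuel : Int) →
    checkQualifiedFuel fuel L i v s
      = altDecide v (altPrefixTotals L (PySem.List.pyRange i (L.length : Int) 1) s) := by
  intro fuel
  induction fuel with
  | zero =>
    intro L v i s h
    rw [PySem.List.pyRange_one_eq_nil (by exact_mod_cast (by omega : (L.length : Int) ≤ i))]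
    rfl
  | succ fuel ih =>
    intro L v i s h
    by_cases hlt : i < (L.length : Int)
    · rw [PySem.List.pyRange_one_cons hlt]
      simp only [checkQualifiedFuel, altPrefixTotals]
      cases hx : PySem.List.pyGet? L i with
      | none => rfl
      | some x =>
        dsimp only
        by_cases hgt : x + s > v
        · rw [if_pos hgt]
          have : v ≤ s + x := by omega
          have hne : ¬ (s + x = v) := by omega
          simp [altDecide, this, hne]
        · rw [if_neg hgt]
          by_cases heq : x + s = v
          · rw [if_pos heq]
            have : v ≤ s + x := by omega
            have he : s + x = v := by omega
            simp [altDecide, he]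
          · rw [if_neg heq]
            have hnle : ¬ (v ≤ s + x) := by omega
            by_cases hend : i + 1 = (L.length : Int)
            · rw [if_pos hend]
              rw [hend, PySem.List.pyRange_one_eq_nil le_rfl]
              simp [altDecide, altPrefixTotals, hnle]
            · rw [if_neg hend]
              rw [ih L v (i + 1) (s + x) (by omega)]
              simp [altDecide, hnle]
    · -- i ≥ len: A's first access raises (none), B's range is empty; both false
      have hge : (L.length : Int) ≤ i := by omega
      rw [PySem.List.pyRange_one_eq_nil hge]
      simp only [checkQualifiedFuel]
      have : PySem.List.pyGet? L i = none := by
        rw [PySem.List.pyGet?_eq_none_iff]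
        simp [PySem.Raise.InRange]
        omega
      rw [this]
      rfl

theorem checkQualified_spec : Claim_equal_checkQualified := by
  intro L i v s _hDom hPre
  have hPre' : -(L.length : Int) ≤ i ∧ i < (L.length : Int) := by
    simpa [PySem.Raise.InRange, Pre_checkQualified] using hPre
  obtain ⟨x0, hx0⟩ : ∃ x0, PySem.List.pyGet? L i = some x0 := by
    cases hx : PySem.List.pyGet? L i with
    | none =>
      rw [PySem.List.pyGet?_eq_none_iff] at hx
      exact absurd hPre hx
    | some x0 => exact ⟨x0, rfl⟩
  unfold Spec_checkQualified checkQualified checkQualified_alt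
  rw [checkQualified_main (2 * L.length + 1) L v i s (by push_cast; omega),
      PySem.List.pyRange_one_cons hPre'.2]
  simp only [altPrefixTotals, hx0, altDecide]
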